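-- pv_equiv track=rewrite | github.com/Manick-0/PositionFactsExtractor | main40.py | infer_spatial_relations
-- ===== SOURCE A (Python) =====
-- def infer_spatial_relations(facts):
--     """ Infer new spatial relations based on given facts """
--     conclusions = []
--
--     for rel1 in facts:
--         for rel2 in facts:
--             # Avoid self-comparison
--             if rel1 != rel2:
--                 A1, B1 = rel1[1], rel1[2]
--                 A2, B2 = rel2[1], rel2[2]
--
--                 # Example: If A is upper-left of B, and B is left of C, then A is above C
--                 if rel1[0] == 'upper-left' and rel2[0] == 'left' and B1 == B2:
--                     conclusions.append(['above', A1, A2])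
--
--                 # If A overlaps B, and A is upper-left of C, we can infer relations
--                 elif rel1[0] == 'overlap' and rel2[0] == 'upper-left' and A1 == A2:
--                     conclusions.append(['upper-left', B1, B2])
--                     conclusions.append(['above', B1, B2])
--
--                 # Additional rule: If A is above B, and B is below C, infer A is above C
--                 elif rel1[0] == 'above' and rel2[0] == 'below' and B1 == A2:
--                     conclusions.append(['above', A1, B2])
--
--                 # Rule: If A is left of B, and B is left of C, then A is left of C
--                 elif rel1[0] == 'left' and rel2[0] == 'left' and B1 == A2:
--                     conclusions.append(['left', A1, B2])
--
--                 # NEW RULE: If A is left of B, and C is above B, infer A is left and below C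
--                 elif rel1[0] == 'left' and rel2[0] == 'above' and B1 == B2:
--                     conclusions.append(['left', A1, A2])
--                     conclusions.append(['below', A1, A2])
--
--                 # Extend further with additional rules
--                 elif rel1[0] == 'above' and rel2[0] == 'above' and B1 == A2:
--                     conclusions.append(['above', A1, B2])
--
--                 elif rel1[0] == 'below' and rel2[0] == 'below' and B1 == A2:
--                     conclusions.append(['below', A1, B2])
--
--     return conclusions
-- ===== SOURCE B (Python) =====
-- def _merge2(xs, ys):
--     """Merge two lists of (index, payload), each sorted by index."""
--     res = []
--     i = j = 0
--     while i < len(xs) and j < len(ys):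
--         if xs[i][0] < ys[j][0]:
--             res.append(xs[i]); i += 1
--         else:
--             res.append(ys[j]); j += 1
--     res.extend(xs[i:])
--     res.extend(ys[j:])
--     return res
--
--
-- def _picks(bucket, r1, make):
--     """Candidates from a bucket, skipping facts equal to r1, with their conclusions."""
--     return [(i, make(r2)) for i, r2 in bucket if r2 != r1]
--
--
-- def infer_spatial_relations(facts):
--     """ Infer new spatial relations based on given facts """
--     # Index facts once by (relation, first endpoint) and (relation, second endpoint).
--     by_a = {}
--     by_b = {}
--     for i, f in enumerate(facts):
--         by_a.setdefault((f[0], f[1]), []).append((i, f))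
--         by_b.setdefault((f[0], f[2]), []).append((i, f))
--
--     out = []
--     for r1 in facts:
--         t, a1, b1 = r1[0], r1[1], r1[2]
--         if t == 'upper-left':
--             cands = _picks(by_b.get(('left', b1), []), r1,
--                            lambda r2: [['above', a1, r2[1]]])
--         elif t == 'overlap':
--             cands = _picks(by_a.get(('upper-left', a1), []), r1,
--                            lambda r2: [['upper-left', b1, r2[2]], ['above', b1, r2[2]]])
--         elif t == 'above':
--             cands = _merge2(_picks(by_a.get(('below', b1), []), r1,
--                                    lambda r2: [['above', a1, r2[2]]]),
--                             _picks(by_a.get(('above', b1), []), r1,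
--                                    lambda r2: [['above', a1, r2[2]]]))
--         elif t == 'left':
--             cands = _merge2(_picks(by_a.get(('left', b1), []), r1,
--                                    lambda r2: [['left', a1, r2[2]]]),
--                             _picks(by_b.get(('above', b1), []), r1,
--                                    lambda r2: [['left', a1, r2[1]], ['below', a1, r2[1]]]))
--         elif t == 'below':
--             cands = _picks(by_a.get(('below', b1), []), r1,
--                            lambda r2: [['below', a1, r2[2]]])
--         else:
--             cands = []
--         for _i, outs in cands:
--             out.extend(outs)
--     return out
-- ===== Notes on version B (the rewrite author's own statement) =====
-- stated objective: faster
-- what changed: Replaced the all-pairs nested scan by two hash indexes keyed on (relation-type, endpoint) built in one pass; for each fact the matching partners are looked up directly and, where a fact type has two rules, the two bucket lists are merged by original index to reproduce the inner-loop order.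
-- outside the precondition, e.g. on infer_spatial_relations([['x']]): A returns [], B raises IndexError
import Mathlib
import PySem

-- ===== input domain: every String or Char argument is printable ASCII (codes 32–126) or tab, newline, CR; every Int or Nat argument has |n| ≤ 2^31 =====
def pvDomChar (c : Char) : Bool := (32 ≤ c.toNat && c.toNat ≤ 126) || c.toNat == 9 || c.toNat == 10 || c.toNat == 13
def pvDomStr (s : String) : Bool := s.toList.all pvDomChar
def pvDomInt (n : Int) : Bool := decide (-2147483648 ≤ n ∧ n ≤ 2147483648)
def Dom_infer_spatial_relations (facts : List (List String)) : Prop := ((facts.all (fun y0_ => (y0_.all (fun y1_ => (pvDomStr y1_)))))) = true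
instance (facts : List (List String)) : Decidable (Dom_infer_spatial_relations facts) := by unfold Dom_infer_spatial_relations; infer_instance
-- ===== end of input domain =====

-- B replaces A's all-pairs nested scan with two hash indexes keyed on (relation-type, endpoint)
-- built in one pass, merging per-fact bucket lookups by original index (objective: faster, measured).

-- rel[i] for i = 0,1,2 (Python raises off the end; Pre_ keeps every fact at length ≥ 3)
def pyAt (l : List String) (i : Int) : String := (PySem.List.pyGet? l i).getD ""

-- ===== PORT A =====
def infer_spatial_relations (facts : List (List String)) : List (List String) :=
  facts.foldl (fun conclusions rel1 =>
    facts.foldl (fun conclusions rel2 =>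
      if rel1 ≠ rel2 then
        let A1 := pyAt rel1 1; let B1 := pyAt rel1 2
        let A2 := pyAt rel2 1; let B2 := pyAt rel2 2
        if pyAt rel1 0 = "upper-left" ∧ pyAt rel2 0 = "left" ∧ B1 = B2 then
          conclusions ++ [["above", A1, A2]]
        else if pyAt rel1 0 = "overlap" ∧ pyAt rel2 0 = "upper-left" ∧ A1 = A2 then
          conclusions ++ [["upper-left", B1, B2], ["above", B1, B2]]
        else if pyAt rel1 0 = "above" ∧ pyAt rel2 0 = "below" ∧ B1 = A2 then
          conclusions ++ [["above", A1, B2]]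
        else if pyAt rel1 0 = "left" ∧ pyAt rel2 0 = "left" ∧ B1 = A2 then
          conclusions ++ [["left", A1, B2]]
        else if pyAt rel1 0 = "left" ∧ pyAt rel2 0 = "above" ∧ B1 = B2 then
          conclusions ++ [["left", A1, A2], ["below", A1, A2]]
        else if pyAt rel1 0 = "above" ∧ pyAt rel2 0 = "above" ∧ B1 = A2 then
          conclusions ++ [["above", A1, B2]]
        else if pyAt rel1 0 = "below" ∧ pyAt rel2 0 = "below" ∧ B1 = A2 then
          conclusions ++ [["below", A1, B2]]
        else conclusions
      else conclusions) conclusions) []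

-- ===== PORT B =====
-- the single indexing loop of Source B: by_a keyed on (f[0], f[1]), by_b on (f[0], f[2])
def buildIdx (facts : List (List String)) :
    PySem.Dict (String × String) (List (Int × List String)) ×
    PySem.Dict (String × String) (List (Int × List String)) :=
  (PySem.List.enumerate facts).foldl
    (fun d p =>
      (d.1.modify (pyAt p.2 0, pyAt p.2 1) [] (· ++ [p]),
       d.2.modify (pyAt p.2 0, pyAt p.2 2) [] (· ++ [p])))
    (PySem.Dict.empty, PySem.Dict.empty)

-- Source B's _picks: candidates from a bucket, skipping facts equal to r1
def picks (bucket : List (Int × List String)) (r1 : List String)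
    (make : List String → List (List String)) : List (Int × List (List String)) :=
  (bucket.filter (fun p => p.2 ≠ r1)).map (fun p => (p.1, make p.2))

-- Source B's _merge2: merge two index-sorted candidate lists
def merge2 : List (Int × List (List String)) → List (Int × List (List String)) →
    List (Int × List (List String))
  | [], ys => ys
  | x :: xs, [] => x :: xs
  | x :: xs, y :: ys =>
    if x.1 < y.1 then x :: merge2 xs (y :: ys) else y :: merge2 (x :: xs) ys

def infer_spatial_relations_alt (facts : List (List String)) : List (List String) :=
  let idx := buildIdx facts
  let byA := idx.1
  let byB := idx.2
  facts.foldl (fun out r1 =>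
    let t := pyAt r1 0
    let a1 := pyAt r1 1
    let b1 := pyAt r1 2
    let cands :=
      if t = "upper-left" then
        picks (byB.getD ("left", b1) []) r1 (fun r2 => [["above", a1, pyAt r2 1]])
      else if t = "overlap" then
        picks (byA.getD ("upper-left", a1) []) r1
          (fun r2 => [["upper-left", b1, pyAt r2 2], ["above", b1, pyAt r2 2]])
      else if t = "above" then
        merge2 (picks (byA.getD ("below", b1) []) r1 (fun r2 => [["above", a1, pyAt r2 2]]))
               (picks (byA.getD ("above", b1) []) r1 (fun r2 => [["above", a1, pyAt r2 2]]))
      else if t = "left" then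
        merge2 (picks (byA.getD ("left", b1) []) r1 (fun r2 => [["left", a1, pyAt r2 2]]))
               (picks (byB.getD ("above", b1) []) r1
                  (fun r2 => [["left", a1, pyAt r2 1], ["below", a1, pyAt r2 1]]))
      else if t = "below" then
        picks (byA.getD ("below", b1) []) r1 (fun r2 => [["below", a1, pyAt r2 2]])
      else []
    cands.foldl (fun out c => out ++ c.2) out) []

-- ===== PRECONDITION & SPEC =====
-- Pre_ excludes facts lists containing an entry of length < 3: Python A raises IndexError on
-- rel[1]/rel[2] there whenever two unequal facts exist, and B raises on the very first such entry.
def Pre_infer_spatial_relations (facts : List (List String)) : Prop :=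
  ∀ f ∈ facts, 3 ≤ f.length
instance (facts : List (List String)) : Decidable (Pre_infer_spatial_relations facts) := by
  unfold Pre_infer_spatial_relations; infer_instance

def pvWitness_infer_spatial_relations : List (List String) :=
  [["upper-left", "a", "b"], ["left", "c", "b"], ["left", "b", "c"]]

def Spec_infer_spatial_relations (facts : List (List String)) (out : List (List String)) : Prop :=
  out = infer_spatial_relations_alt facts
instance (facts : List (List String)) (out : List (List String)) :
    Decidable (Spec_infer_spatial_relations facts out) := by
  unfold Spec_infer_spatial_relations; infer_instance

-- ===== CLAIM (what is proved, stated in full; the proofs are below) =====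
def Claim_equal_infer_spatial_relations : Prop :=
  ∀ (facts : List (List String)), Dom_infer_spatial_relations facts →
    Pre_infer_spatial_relations facts →
    Spec_infer_spatial_relations facts (infer_spatial_relations facts)

-- ===== LEMMAS AND PROOFS =====

-- A's per-pair contribution (the elif chain as a value)
def stepA (r1 r2 : List String) : List (List String) :=
  if r1 ≠ r2 then
    if pyAt r1 0 = "upper-left" ∧ pyAt r2 0 = "left" ∧ pyAt r1 2 = pyAt r2 2 then
      [["above", pyAt r1 1, pyAt r2 1]]
    else if pyAt r1 0 = "overlap" ∧ pyAt r2 0 = "upper-left" ∧ pyAt r1 1 = pyAt r2 1 then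
      [["upper-left", pyAt r1 2, pyAt r2 2], ["above", pyAt r1 2, pyAt r2 2]]
    else if pyAt r1 0 = "above" ∧ pyAt r2 0 = "below" ∧ pyAt r1 2 = pyAt r2 1 then
      [["above", pyAt r1 1, pyAt r2 2]]
    else if pyAt r1 0 = "left" ∧ pyAt r2 0 = "left" ∧ pyAt r1 2 = pyAt r2 1 then
      [["left", pyAt r1 1, pyAt r2 2]]
    else if pyAt r1 0 = "left" ∧ pyAt r2 0 = "above" ∧ pyAt r1 2 = pyAt r2 2 then
      [["left", pyAt r1 1, pyAt r2 1], ["below", pyAt r1 1, pyAt r2 1]]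
    else if pyAt r1 0 = "above" ∧ pyAt r2 0 = "above" ∧ pyAt r1 2 = pyAt r2 1 then
      [["above", pyAt r1 1, pyAt r2 2]]
    else if pyAt r1 0 = "below" ∧ pyAt r2 0 = "below" ∧ pyAt r1 2 = pyAt r2 1 then
      [["below", pyAt r1 1, pyAt r2 2]]
    else []
  else []

lemma A_eq (facts : List (List String)) :
    infer_spatial_relations facts = facts.flatMap (fun r1 => facts.flatMap (stepA r1)) := by
  unfold infer_spatial_relations
  have hin : ∀ (r1 : List String),
      (fun (conclusions : List (List String)) (rel2 : List String) =>
        if r1 ≠ rel2 then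
          let A1 := pyAt r1 1; let B1 := pyAt r1 2
          let A2 := pyAt rel2 1; let B2 := pyAt rel2 2
          if pyAt r1 0 = "upper-left" ∧ pyAt rel2 0 = "left" ∧ B1 = B2 then
            conclusions ++ [["above", A1, A2]]
          else if pyAt r1 0 = "overlap" ∧ pyAt rel2 0 = "upper-left" ∧ A1 = A2 then
            conclusions ++ [["upper-left", B1, B2], ["above", B1, B2]]
          else if pyAt r1 0 = "above" ∧ pyAt rel2 0 = "below" ∧ B1 = A2 then
            conclusions ++ [["above", A1, B2]]
          else if pyAt r1 0 = "left" ∧ pyAt rel2 0 = "left" ∧ B1 = A2 then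
            conclusions ++ [["left", A1, B2]]
          else if pyAt r1 0 = "left" ∧ pyAt rel2 0 = "above" ∧ B1 = B2 then
            conclusions ++ [["left", A1, A2], ["below", A1, A2]]
          else if pyAt r1 0 = "above" ∧ pyAt rel2 0 = "above" ∧ B1 = A2 then
            conclusions ++ [["above", A1, B2]]
          else if pyAt r1 0 = "below" ∧ pyAt rel2 0 = "below" ∧ B1 = A2 then
            conclusions ++ [["below", A1, B2]]
          else conclusions
        else conclusions)
      = fun conclusions rel2 => conclusions ++ stepA r1 rel2 := by
    intro r1; funext c rel2
    simp only [stepA]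
    split_ifs <;> simp
  simp only [hin, PySem.List.foldl_append_eq_flatMap, List.nil_append]

lemma foldl_pair {α δ₁ δ₂ : Type} (f : δ₁ → α → δ₁) (g : δ₂ → α → δ₂) :
    ∀ (l : List α) (a : δ₁) (b : δ₂),
      l.foldl (fun d p => (f d.1 p, g d.2 p)) (a, b) = (l.foldl f a, l.foldl g b) := by
  intro l; induction l with
  | nil => intro a b; rfl
  | cons x t ih => intro a b; simp [List.foldl_cons, ih]

-- bucket contents of the two indexes
lemma bucket_getD (facts : List (List String)) (key : Int × List String → String × String)
    (c : String × String) :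
    ((PySem.List.enumerate facts).foldl
        (fun (d : PySem.Dict (String × String) (List (Int × List String))) p =>
          d.modify (key p) [] (· ++ [p])) PySem.Dict.empty).getD c []
      = (PySem.List.enumerate facts).filter (fun p => key p == c) := by
  have h1 : List.foldl
        (fun (d : PySem.Dict (String × String) (List (Int × List String))) p =>
          d.modify (key p) [] (· ++ [p])) PySem.Dict.empty (PySem.List.enumerate facts)
      = List.foldl (fun d q => d.modify q.1 [] (· ++ [q.2])) PySem.Dict.empty
          ((PySem.List.enumerate facts).map (fun p => (key p, p))) := (List.foldl_map (f := fun p => (key p, p)) (g := fun (d : PySem.Dict (String × String) (List (Int × List String))) q => d.modify q.1 [] (· ++ [q.2]))).symm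
  rw [h1, PySem.Dict.getD_foldl_modify_append]
  simp [List.filter_map, Function.comp_def]

lemma fst_mem_of_mem_filterMap (F : Int × List String → Option (Int × List (List String)))
    (hF : ∀ p q, F p = some q → q.1 = p.1) {l : List (Int × List String)}
    {q : Int × List (List String)} (hq : q ∈ l.filterMap F) :
    ∃ p ∈ l, q.1 = p.1 := by
  rcases List.mem_filterMap.mp hq with ⟨p, hp, hFp⟩
  exact ⟨p, hp, hF p q hFp⟩

lemma merge2_filterMap (F G : Int × List String → Option (Int × List (List String)))
    (hF : ∀ p q, F p = some q → q.1 = p.1)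
    (hG : ∀ p q, G p = some q → q.1 = p.1)
    (hd : ∀ p, F p = none ∨ G p = none) :
    ∀ l : List (Int × List String), l.Pairwise (fun p q => p.1 < q.1) →
      merge2 (l.filterMap F) (l.filterMap G)
        = l.filterMap (fun p => (F p).orElse (fun _ => G p)) := by
  intro l
  induction l with
  | nil => intro _; simp [merge2]
  | cons a t ih =>
    intro hpw
    have hpw' := (List.pairwise_cons.mp hpw).2
    have hlt := (List.pairwise_cons.mp hpw).1
    rcases hFa : F a with _ | b
    · rcases hGa : G a with _ | b
      · -- both none
        simp only [List.filterMap_cons, hFa, hGa, Option.orElse_none]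
        exact ih hpw'
      · -- F none, G some
        simp only [List.filterMap_cons, hFa, hGa, Option.orElse_none]
        rcases hFt : t.filterMap F with _ | ⟨x, xs⟩
        · have : t.filterMap (fun p => (F p).orElse (fun _ => G p)) = t.filterMap G := by
            apply List.filterMap_congr
            intro p hp
            have : F p = none := List.filterMap_eq_nil_iff.mp hFt p hp
            simp [this]
          rw [merge2, this]
        · have hbx : b.1 < x.1 := by
            rcases fst_mem_of_mem_filterMap F hF (hFt ▸ List.mem_cons_self) with ⟨p, hp, hxp⟩
            have := hG a b hGa
            rw [this, hxp]
            exact hlt p hp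
          rw [merge2]
          rw [if_neg (by omega)]
          rw [← hFt, ih hpw']
    · -- F some
      have hGa : G a = none := by
        rcases hd a with h | h
        · rw [h] at hFa; cases hFa
        · exact h
      simp only [List.filterMap_cons, hFa, hGa, Option.orElse_some]
      rcases hGt : t.filterMap G with _ | ⟨y, ys⟩
      · have : t.filterMap (fun p => (F p).orElse (fun _ => G p)) = t.filterMap F := by
          apply List.filterMap_congr
          intro p hp
          rcases hFp : F p with _ | c
          · have : G p = none := List.filterMap_eq_nil_iff.mp hGt p hp
            simp [this]
          · simp
        rw [merge2, this]
      · have hby : b.1 < y.1 := by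
          rcases fst_mem_of_mem_filterMap G hG (hGt ▸ List.mem_cons_self) with ⟨p, hp, hyp⟩
          have := hF a b hFa
          rw [this, hyp]
          exact hlt p hp
        rw [merge2, if_pos hby, ← hGt, ih hpw']

lemma picks_filter (K : Int × List String → Bool) (r1 : List String)
    (make : List String → List (List String)) :
    ∀ l : List (Int × List String),
      picks (l.filter K) r1 make
        = l.filterMap (fun p => if K p = true ∧ p.2 ≠ r1 then some (p.1, make p.2) else none) := by
  intro l
  induction l with
  | nil => rfl
  | cons a t ih =>
    by_cases hK : K a = true
    · by_cases ha : a.2 ≠ r1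
      · simp [picks, hK, ha] at ih ⊢
        exact ih
      · simp [picks, hK, ha] at ih ⊢
        exact ih
    · simp [picks, hK] at ih ⊢
      exact ih

lemma flatMap_snd_filterMap (F : Int × List String → Option (Int × List (List String))) :
    ∀ l : List (Int × List String),
      (l.filterMap F).flatMap (fun c => c.2)
        = l.flatMap (fun p => ((F p).map (fun c => c.2)).getD []) := by
  intro l
  induction l with
  | nil => rfl
  | cons a t ih =>
    rcases hFa : F a with _ | b
    · simp [hFa, ih]
    · simp [hFa, ih]

lemma flatMap_enumerate (g : List String → List (List String)) (facts : List (List String)) :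
    (PySem.List.enumerate facts).flatMap (fun p => g p.2) = facts.flatMap g := by
  conv_rhs => rw [← PySem.List.map_snd_enumerate (xs := facts) (s := 0), List.flatMap_map]

def idxA (facts : List (List String)) : PySem.Dict (String × String) (List (Int × List String)) :=
  (PySem.List.enumerate facts).foldl
    (fun d p => d.modify (pyAt p.2 0, pyAt p.2 1) [] (· ++ [p])) PySem.Dict.empty

def idxB (facts : List (List String)) : PySem.Dict (String × String) (List (Int × List String)) :=
  (PySem.List.enumerate facts).foldl
    (fun d p => d.modify (pyAt p.2 0, pyAt p.2 2) [] (· ++ [p])) PySem.Dict.empty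

lemma buildIdx_eq (facts : List (List String)) :
    buildIdx facts = (idxA facts, idxB facts) := by
  unfold buildIdx idxA idxB
  exact foldl_pair
    (fun (d : PySem.Dict (String × String) (List (Int × List String))) p =>
      d.modify (pyAt p.2 0, pyAt p.2 1) [] (· ++ [p]))
    (fun (d : PySem.Dict (String × String) (List (Int × List String))) p =>
      d.modify (pyAt p.2 0, pyAt p.2 2) [] (· ++ [p])) _ _ _

lemma idxA_getD (facts : List (List String)) (c : String × String) :
    (idxA facts).getD c []
      = (PySem.List.enumerate facts).filter (fun p => (pyAt p.2 0, pyAt p.2 1) == c) :=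
  bucket_getD facts (fun p => (pyAt p.2 0, pyAt p.2 1)) c

lemma idxB_getD (facts : List (List String)) (c : String × String) :
    (idxB facts).getD c []
      = (PySem.List.enumerate facts).filter (fun p => (pyAt p.2 0, pyAt p.2 2) == c) :=
  bucket_getD facts (fun p => (pyAt p.2 0, pyAt p.2 2)) c

set_option maxHeartbeats 2000000 in
lemma perR1 (facts : List (List String)) (r1 : List String) :
    (if pyAt r1 0 = "upper-left" then
        picks ((idxB facts).getD ("left", pyAt r1 2) []) r1
          (fun r2 => [["above", pyAt r1 1, pyAt r2 1]])
      else if pyAt r1 0 = "overlap" then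
        picks ((idxA facts).getD ("upper-left", pyAt r1 1) []) r1
          (fun r2 => [["upper-left", pyAt r1 2, pyAt r2 2], ["above", pyAt r1 2, pyAt r2 2]])
      else if pyAt r1 0 = "above" then
        merge2 (picks ((idxA facts).getD ("below", pyAt r1 2) []) r1
                  (fun r2 => [["above", pyAt r1 1, pyAt r2 2]]))
               (picks ((idxA facts).getD ("above", pyAt r1 2) []) r1
                  (fun r2 => [["above", pyAt r1 1, pyAt r2 2]]))
      else if pyAt r1 0 = "left" then
        merge2 (picks ((idxA facts).getD ("left", pyAt r1 2) []) r1
                  (fun r2 => [["left", pyAt r1 1, pyAt r2 2]]))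
               (picks ((idxB facts).getD ("above", pyAt r1 2) []) r1
                  (fun r2 => [["left", pyAt r1 1, pyAt r2 1], ["below", pyAt r1 1, pyAt r2 1]]))
      else if pyAt r1 0 = "below" then
        picks ((idxA facts).getD ("below", pyAt r1 2) []) r1
          (fun r2 => [["below", pyAt r1 1, pyAt r2 2]])
      else []).flatMap (fun c => c.2)
      = facts.flatMap (stepA r1) := by
  by_cases h1 : pyAt r1 0 = "upper-left"
  · rw [if_pos h1, idxB_getD, picks_filter, flatMap_snd_filterMap, ← flatMap_enumerate (stepA r1)]
    congr 1
    funext p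
    by_cases hp : p.2 = r1
    · simp [stepA, hp, h1]
    · simp only [stepA, h1]
      split_ifs <;> simp_all
  rw [if_neg h1]
  by_cases h2 : pyAt r1 0 = "overlap"
  · rw [if_pos h2, idxA_getD, picks_filter, flatMap_snd_filterMap, ← flatMap_enumerate (stepA r1)]
    congr 1
    funext p
    by_cases hp : p.2 = r1
    · simp [stepA, hp, h2]
    · simp only [stepA, h2]
      split_ifs <;> simp_all
  rw [if_neg h2]
  by_cases h3 : pyAt r1 0 = "above"
  · rw [if_pos h3, idxA_getD, idxA_getD, picks_filter, picks_filter,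
        merge2_filterMap _ _ (by intro p q h; split_ifs at h; · cases h; rfl) (by intro p q h; split_ifs at h; · cases h; rfl)
          (by
            intro p
            by_cases hb : pyAt p.2 0 = "below"
            · right; rw [if_neg]; simp [hb]
            · left; rw [if_neg]; simp [hb])
          _ (PySem.List.pairwise_lt_enumerate facts 0),
        flatMap_snd_filterMap, ← flatMap_enumerate (stepA r1)]
    congr 1
    funext p
    by_cases hp : p.2 = r1
    · simp [stepA, hp, h3]
    · simp only [stepA, h3]
      split_ifs <;> simp_all
  rw [if_neg h3]
  by_cases h4 : pyAt r1 0 = "left"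
  · rw [if_pos h4, idxA_getD, idxB_getD, picks_filter, picks_filter,
        merge2_filterMap _ _ (by intro p q h; split_ifs at h; · cases h; rfl) (by intro p q h; split_ifs at h; · cases h; rfl)
          (by
            intro p
            by_cases hb : pyAt p.2 0 = "left"
            · right; rw [if_neg]; simp [hb]
            · left; rw [if_neg]; simp [hb])
          _ (PySem.List.pairwise_lt_enumerate facts 0),
        flatMap_snd_filterMap, ← flatMap_enumerate (stepA r1)]
    congr 1
    funext p
    by_cases hp : p.2 = r1
    · simp [stepA, hp, h4]
    · simp only [stepA, h4]
      split_ifs <;> simp_all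
  rw [if_neg h4]
  by_cases h5 : pyAt r1 0 = "below"
  · rw [if_pos h5, idxA_getD, picks_filter, flatMap_snd_filterMap, ← flatMap_enumerate (stepA r1)]
    congr 1
    funext p
    by_cases hp : p.2 = r1
    · simp [stepA, hp, h5]
    · simp only [stepA, h5]
      split_ifs <;> simp_all
  rw [if_neg h5, ← flatMap_enumerate (stepA r1)]
  have hz : ∀ p : Int × List String, stepA r1 p.2 = [] := by
    intro p
    simp only [stepA]
    split_ifs <;> simp_all
  simp [hz]

lemma B_eq (facts : List (List String)) :
    infer_spatial_relations_alt facts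
      = facts.flatMap (fun r1 => facts.flatMap (stepA r1)) := by
  unfold infer_spatial_relations_alt
  simp only [buildIdx_eq]
  simp only [PySem.List.foldl_append_eq_flatMap, List.nil_append]
  congr 1
  funext r1
  exact perR1 facts r1

-- ===== VERDICT (by name: the statement is the Claim_ definition above) =====
theorem infer_spatial_relations_spec : Claim_equal_infer_spatial_relations := by
  intro facts _ _
  unfold Spec_infer_spatial_relations
  exact (A_eq facts).trans (B_eq facts).symm
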